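-- pv_equiv track=rewrite | github.com/amoravski/dotfiles | goat.py | find_max_2
-- ===== SOURCE A (Python) =====
-- import functools
--
-- def find_max_2(N):
--     capacity = []
--     possible = []
--     for i in range(0, len(N)):
--         possible.append(functools.reduce(lambda a,b: a+b, N[i:]))
--         possible.append(functools.reduce(lambda a,b: a+b, N[:i+1]))
--         capacity.append(max(possible[:]))
--         possible = []
--         if i == len(N)-1:
--             return min(capacity)
--
--     return min(capacity)
-- ===== SOURCE B (Python) =====
-- def find_max_2(N):
--     total = sum(N)
--     caps = []
--     p = 0
--     for x in N:
--         p += x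
--         caps.append(max(total - p + x, p))
--     return min(caps)
-- ===== Notes on version B (the rewrite author's own statement) =====
-- stated objective: faster
-- what changed: A recomputes the suffix sum N[i:] and prefix sum N[:i+1] from scratch with reduce for every i (quadratic); B computes the total once and maintains a running prefix sum, deriving each suffix sum as total - previous prefix, in a single pass.
import Mathlib
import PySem

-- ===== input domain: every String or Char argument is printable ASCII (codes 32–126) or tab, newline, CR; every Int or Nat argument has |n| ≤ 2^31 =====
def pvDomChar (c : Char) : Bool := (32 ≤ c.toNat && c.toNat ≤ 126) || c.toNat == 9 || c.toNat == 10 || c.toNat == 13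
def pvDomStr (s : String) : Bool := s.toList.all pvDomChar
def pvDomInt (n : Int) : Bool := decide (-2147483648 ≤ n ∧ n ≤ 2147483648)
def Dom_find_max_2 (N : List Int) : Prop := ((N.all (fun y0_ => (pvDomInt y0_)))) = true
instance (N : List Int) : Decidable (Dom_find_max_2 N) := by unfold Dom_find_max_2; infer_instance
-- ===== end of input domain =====

-- B replaces A's per-index reduce over both slices (quadratic) with one total and a running
-- prefix sum in a single pass; equivalence is about the return value only.

-- ===== PORT A =====
-- functools.reduce(lambda a,b: a+b, l) on a nonempty list (the [] case is unreachable under Pre_)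
def pyReduceAdd (l : List Int) : Int :=
  match l with
  | [] => 0
  | h :: t => t.foldl (· + ·) h

-- max(l) for nonempty l (A only applies it to two-element lists)
def pyMaxList (l : List Int) : Int :=
  match l with
  | [] => 0
  | h :: t => t.foldl max h

-- min(l) for nonempty l (the [] case is Python's ValueError, excluded by Pre_)
def pyMinList (l : List Int) : Int :=
  match l with
  | [] => 0
  | h :: t => t.foldl min h

def find_max_2 (N : List Int) : Int :=
  pyMinList ((List.range N.length).map (fun (i : Nat) =>
    pyMaxList [pyReduceAdd (PySem.List.slice N (some (i : Int)) none),
               pyReduceAdd (PySem.List.slice N none (some ((i : Int) + 1)))]))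

-- ===== PORT B =====
-- B's min() is the same Python builtin as A's: the shared helper pyMinList above ports it
def find_max_2_alt (N : List Int) : Int :=
  pyMinList (N.foldl
    (fun (st : Int × List Int) x =>
      (st.1 + x, st.2 ++ [max (N.sum - (st.1 + x) + x) (st.1 + x)]))
    (0, ([] : List Int))).2

-- ===== PRECONDITION & SPEC =====
-- On N = [] both A and B call min() on an empty list and raise ValueError; excluded.
def Pre_find_max_2 (N : List Int) : Prop := N ≠ []
instance (N : List Int) : Decidable (Pre_find_max_2 N) := by unfold Pre_find_max_2; infer_instance
def pvWitness_find_max_2 : List Int := [3, -1, 4]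

def Spec_find_max_2 (N : List Int) (out : Int) : Prop := out = find_max_2_alt N
instance (N : List Int) (out : Int) : Decidable (Spec_find_max_2 N out) := by unfold Spec_find_max_2; infer_instance

-- ===== CLAIM (what is proved, stated in full; the proofs are below) =====
def Claim_equal_find_max_2 : Prop := ∀ (N : List Int), Dom_find_max_2 N → Pre_find_max_2 N → Spec_find_max_2 N (find_max_2 N)

-- ===== LEMMAS AND PROOFS =====

theorem reduceAdd_eq_sum (l : List Int) (h : l ≠ []) : pyReduceAdd l = l.sum := by
  cases l with
  | nil => exact absurd rfl h
  | cons x t =>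
    show t.foldl (· + ·) x = (x :: t).sum
    simpa using PySem.List.foldl_add t id x

-- B's loop produces exactly the prefix/suffix capacities, indexed over range
theorem alt_fold_caps (t : Int) : ∀ (l : List Int) (p : Int) (acc : List Int),
    (l.foldl
      (fun (st : Int × List Int) x =>
        (st.1 + x, st.2 ++ [max (t - (st.1 + x) + x) (st.1 + x)]))
      (p, acc)).2
    = acc ++ (List.range l.length).map
        (fun i => max (t - p - (l.take i).sum) (p + (l.take (i + 1)).sum)) := by
  intro l
  induction l with
  | nil => intro p acc; simp
  | cons x r ih =>
    intro p acc
    simp only [List.foldl_cons, List.length_cons, List.range_succ_eq_map]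
    rw [ih, List.map_cons]
    simp only [List.append_assoc, List.singleton_append, List.map_map]
    congr 1
    congr 1
    · simp only [zero_add, List.take_succ_cons, List.take_zero, List.sum_cons, List.sum_nil]
      omega
    · apply List.map_congr_left
      intro i _
      simp only [Function.comp_apply, Nat.succ_eq_add_one, List.take_succ_cons, List.sum_cons]
      omega

theorem find_max_2_spec_aux (N : List Int) (h : N ≠ []) : find_max_2 N = find_max_2_alt N := by
  unfold find_max_2 find_max_2_alt
  rw [alt_fold_caps]
  simp only [List.nil_append]
  congr 1
  apply List.map_congr_left
  intro i hi
  rw [List.mem_range] at hi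
  have h1 : PySem.List.slice N (some (i : Int)) none = N.drop i :=
    PySem.List.slice_from_natCast N i
  have h2 : PySem.List.slice N none (some ((i : Int) + 1)) = N.take (i + 1) := by
    have hc : ((i : Int) + 1) = ((i + 1 : Nat) : Int) := by push_cast; ring
    rw [hc, PySem.List.slice_to_natCast]
  have hdrop : N.drop i ≠ [] := by
    simp [List.drop_eq_nil_iff]
    omega
  have htake : N.take (i + 1) ≠ [] := by
    cases N with
    | nil => exact absurd rfl h
    | cons a b => simp [List.take_succ_cons]
  have hsum : (N.take i).sum + (N.drop i).sum = N.sum := List.sum_take_add_sum_drop N i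
  rw [h1, h2, reduceAdd_eq_sum _ hdrop, reduceAdd_eq_sum _ htake]
  simp [pyMaxList]
  omega

-- ===== VERDICT (by name: the statement is the Claim_ definition above) =====
theorem find_max_2_spec : Claim_equal_find_max_2 := by
  intro N _ hpre
  unfold Spec_find_max_2
  exact find_max_2_spec_aux N hpre
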